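-- pv_equiv track=rewrite | github.com/tahabenhima/projet-devsecops | services/fix-suggester/src/diff_generator.py | format_diff_with_line_numbers
-- ===== SOURCE A (Python) =====
-- def format_diff_with_line_numbers(diff: str) -> str:
--     """
--     Format diff with line numbers for better readability.
--
--     Args:
--         diff: Unified diff string
--
--     Returns:
--         Formatted diff with line numbers
--     """
--     lines = diff.split('\n')
--     formatted_lines = []
--
--     for i, line in enumerate(lines, 1):
--         if line.startswith('@@'):
--             formatted_lines.append(f"\n{line}")
--         else:
--             formatted_lines.append(line)
--
--     return '\n'.join(formatted_lines)
-- ===== SOURCE B (Python) =====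
-- def format_diff_with_line_numbers(diff: str) -> str:
--     """
--     Format diff with line numbers for better readability.
--
--     Args:
--         diff: Unified diff string
--
--     Returns:
--         Formatted diff with line numbers
--     """
--     out = diff.replace('\n@@', '\n\n@@')
--     return '\n' + out if diff.startswith('@@') else out
-- ===== Notes on version B (the rewrite author's own statement) =====
-- stated objective: idiomatic
-- what changed: Replaces the split/enumerate/append-loop/join pipeline with a single str.replace that doubles every newline preceding a hunk header, plus one startswith check for the first line; no line list is ever built.
import Mathlib
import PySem

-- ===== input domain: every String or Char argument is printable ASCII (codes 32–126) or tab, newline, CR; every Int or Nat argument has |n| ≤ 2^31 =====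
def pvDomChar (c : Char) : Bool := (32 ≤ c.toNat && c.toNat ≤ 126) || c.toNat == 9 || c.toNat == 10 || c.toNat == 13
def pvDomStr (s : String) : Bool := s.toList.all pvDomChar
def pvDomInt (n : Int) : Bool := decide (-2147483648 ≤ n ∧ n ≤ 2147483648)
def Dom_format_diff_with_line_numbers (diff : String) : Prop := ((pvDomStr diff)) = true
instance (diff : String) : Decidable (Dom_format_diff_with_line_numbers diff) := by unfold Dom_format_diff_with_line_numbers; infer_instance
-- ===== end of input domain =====

-- B replaces A's split/loop/join over a line list by one str.replace on the raw string (doubling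
-- each newline that precedes a hunk header) plus a startswith check for the first line.

-- ===== PORT A =====
def format_diff_with_line_numbers (diff : String) : String :=
  let lines : List String := (PySem.Chars.splitOn diff.toList "\n".toList).map String.ofList
  let formatted_lines : List String :=
    (PySem.List.enumerate lines 1).foldl
      (fun acc p => if PySem.Str.startswith p.2 "@@" then acc ++ ["\n" ++ p.2] else acc ++ [p.2]) []
  PySem.Str.join "\n" formatted_lines

-- ===== PORT B =====
def format_diff_with_line_numbers_alt (diff : String) : String :=
  let out := PySem.Str.replace diff "\n@@" "\n\n@@"
  if PySem.Str.startswith diff "@@" then "\n" ++ out else out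

-- ===== PRECONDITION & SPEC =====
def Spec_format_diff_with_line_numbers (diff : String) (out : String) : Prop := out = format_diff_with_line_numbers_alt diff
instance (diff : String) (out : String) : Decidable (Spec_format_diff_with_line_numbers diff out) := by unfold Spec_format_diff_with_line_numbers; infer_instance

-- ===== CLAIM (what is proved, stated in full; the proofs are below) =====
def Claim_equal_format_diff_with_line_numbers : Prop := ∀ (diff : String), Dom_format_diff_with_line_numbers diff → Spec_format_diff_with_line_numbers diff (format_diff_with_line_numbers diff)

-- ===== LEMMAS AND PROOFS =====

-- pure split of a char list at '\n' (characterises PySem.Chars.splitOn · ['\n'])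
def splitNl : List Char → List (List Char)
  | [] => [[]]
  | c :: r =>
    if c = '\n' then [] :: splitNl r
    else match splitNl r with
         | h :: t => (c :: h) :: t
         | [] => [[c]]

-- pure characterisation of PySem.Chars.replace · ['\n','@','@'] ['\n','\n','@','@']
def repl : List Char → List Char
  | [] => []
  | c :: r =>
    if c = '\n' ∧ ['@', '@'] <+: r
    then '\n' :: '\n' :: '@' :: '@' :: repl (r.drop 2)
    else c :: repl r
termination_by l => l.length
decreasing_by all_goals (simp [List.length_drop]; try omega)

-- A's per-line transformation, and the joined tail of lines (each preceded by '\n')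
def fF (p : List Char) : List Char :=
  if PySem.Chars.startswith p ['@', '@'] then '\n' :: p else p

def tT (ps : List (List Char)) : List Char := ps.flatMap (fun p => '\n' :: fF p)

lemma splitNl_shape (l : List Char) : ∃ h t, splitNl l = h :: t := by
  cases l with
  | nil => exact ⟨[], [], rfl⟩
  | cons c r =>
    simp only [splitNl]
    split
    · exact ⟨_, _, rfl⟩
    · rcases hs : splitNl r with _ | ⟨h, t⟩ <;> exact ⟨_, _, rfl⟩

lemma go_split (fuel : Nat) : ∀ (l cur : List Char) (acc : List (List Char)), l.length ≤ fuel →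
    PySem.Chars.splitOn.go ['\n'] fuel l cur acc =
      acc.reverse ++ (match splitNl l with
                      | h :: t => (cur.reverse ++ h) :: t
                      | [] => []) := by
  induction fuel with
  | zero =>
    intro l cur acc hl
    have : l = [] := by cases l <;> simp_all
    subst this
    simp [PySem.Chars.splitOn.go, splitNl]
  | succ n ih =>
    intro l cur acc hl
    cases l with
    | nil => simp [PySem.Chars.splitOn.go, splitNl]
    | cons c r =>
      simp only [List.length_cons] at hl
      simp only [PySem.Chars.splitOn.go]
      by_cases hc : c = '\n'
      · subst hc
        rw [if_pos (by simp [List.isPrefixOf])]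
        rw [ih _ _ _ (by simpa using Nat.le_of_succ_le_succ hl)]
        simp only [splitNl]
        rcases splitNl_shape r with ⟨h, t, hs⟩
        simp [hs]
      · rw [if_neg (by simp [List.isPrefixOf]; intro h; exact absurd h.symm hc)]
        rw [ih r (c :: cur) acc (Nat.le_of_succ_le_succ hl)]
        simp only [splitNl, if_neg hc]
        rcases splitNl_shape r with ⟨h, t, hs⟩
        simp [hs]

lemma splitOn_eq (s : List Char) : PySem.Chars.splitOn s ['\n'] = splitNl s := by
  rw [PySem.Chars.splitOn, go_split (s.length + 1) s [] [] (Nat.le_succ _)]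
  rcases splitNl_shape s with ⟨h, t, hs⟩
  simp [hs]

lemma go_repl (fuel : Nat) : ∀ (l acc : List Char), l.length ≤ fuel →
    PySem.Chars.replace.go ['\n', '@', '@'] ['\n', '\n', '@', '@'] fuel l acc =
      acc.reverse ++ repl l := by
  induction fuel with
  | zero =>
    intro l acc hl
    have : l = [] := by cases l <;> simp_all
    subst this
    simp [PySem.Chars.replace.go, repl]
  | succ n ih =>
    intro l acc hl
    cases l with
    | nil => simp [PySem.Chars.replace.go, repl]
    | cons c r =>
      simp only [List.length_cons] at hl
      simp only [PySem.Chars.replace.go]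
      by_cases hp : c = '\n' ∧ ['@', '@'] <+: r
      · rw [if_pos (by simp [List.isPrefixOf, hp.1]
                       exact hp.2)]
        have hdrop : List.drop (['\n', '@', '@'] : List Char).length (c :: r) = r.drop 2 := by
          simp
        rw [hdrop]
        rw [ih (r.drop 2) _ (by rw [List.length_drop]; omega)]
        rw [repl, if_pos hp]
        simp
      · rw [if_neg (by simp [List.isPrefixOf]
                       intro h1 h2
                       exact hp ⟨h1.symm, h2⟩)]
        rw [ih r _ (Nat.le_of_succ_le_succ hl)]
        rw [repl, if_neg hp]
        simp
lemma replace_eq (s : List Char) :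
    PySem.Chars.replace s ['\n', '@', '@'] ['\n', '\n', '@', '@'] = repl s := by
  rw [PySem.Chars.replace, if_neg (by simp)]
  simpa using go_repl s.length s [] (le_refl _)

lemma join_map (h : List Char) (t : List (List Char)) :
    PySem.Chars.join ['\n'] ((h :: t).map fF) = fF h ++ tT t := by
  induction t generalizing h with
  | nil => simp [PySem.Chars.join, tT, List.intercalate]
  | cons h2 t2 ih =>
    simp only [PySem.Chars.join, List.intercalate, List.map_cons] at ih ⊢
    rw [List.intersperse_cons₂]
    simp only [List.flatten_cons, tT, List.flatMap_cons] at ih ⊢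
    simp [ih]

-- startswith "@@" on a raw char list agrees with startswith "@@" on its first '\n'-segment
lemma startswith_split (r : List Char) (h2 : List Char) (t2 : List (List Char))
    (hs2 : splitNl r = h2 :: t2) :
    PySem.Chars.startswith r ['@', '@'] = PySem.Chars.startswith h2 ['@', '@'] := by
  rcases r with _ | ⟨d, r2⟩
  · simp only [splitNl] at hs2
    obtain ⟨rfl, rfl⟩ := List.cons.inj hs2
    rfl
  · by_cases hd : d = '\n'
    · subst hd
      simp only [splitNl] at hs2
      obtain ⟨rfl, rfl⟩ := List.cons.inj hs2
      simp [PySem.Chars.startswith, List.isPrefixOf]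
    · simp only [splitNl, if_neg hd] at hs2
      rcases splitNl_shape r2 with ⟨h3, t3, hs3⟩
      rw [hs3] at hs2
      obtain ⟨rfl, rfl⟩ := List.cons.inj hs2
      rcases r2 with _ | ⟨e, r3⟩
      · simp only [splitNl] at hs3
        obtain ⟨rfl, rfl⟩ := List.cons.inj hs3
        simp [PySem.Chars.startswith, List.isPrefixOf]
      · by_cases he : e = '\n'
        · subst he
          simp only [splitNl] at hs3
          obtain ⟨rfl, rfl⟩ := List.cons.inj hs3
          simp [PySem.Chars.startswith, List.isPrefixOf]
        · simp only [splitNl, if_neg he] at hs3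
          rcases splitNl_shape r3 with ⟨h4, t4, hs4⟩
          rw [hs4] at hs3
          obtain ⟨rfl, rfl⟩ := List.cons.inj hs3
          simp [PySem.Chars.startswith, List.isPrefixOf]

-- the crux: repl re-creates, line by line, the joined tail that A builds
lemma main_lemma (n : Nat) : ∀ (l : List Char), l.length ≤ n → ∀ h t, splitNl l = h :: t →
    repl l = h ++ tT t := by
  induction n with
  | zero =>
    intro l hl h t hs
    have : l = [] := by cases l <;> simp_all
    subst this
    simp only [splitNl] at hs
    obtain ⟨rfl, rfl⟩ := List.cons.inj hs
    simp [repl, tT]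
  | succ n ih =>
    intro l hl h t hs
    cases l with
    | nil =>
      simp only [splitNl] at hs
      obtain ⟨rfl, rfl⟩ := List.cons.inj hs
      simp [repl, tT]
    | cons c r =>
      simp only [List.length_cons] at hl
      have hr : r.length ≤ n := Nat.le_of_succ_le_succ hl
      by_cases hc : c = '\n'
      · subst hc
        simp only [splitNl] at hs
        obtain ⟨rfl, rfl⟩ := List.cons.inj hs
        rcases splitNl_shape r with ⟨h2, t2, hs2⟩
        rw [hs2]
        by_cases hp : (['@', '@'] : List Char) <+: r
        · obtain ⟨r3, rfl⟩ := hp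
          rw [repl, if_pos ⟨rfl, ⟨r3, rfl⟩⟩]
          simp only [List.cons_append, List.nil_append] at hs2 hl ⊢
          rcases splitNl_shape r3 with ⟨h3, t3, hs3⟩
          have hsr : splitNl ('@' :: '@' :: r3) = ('@' :: '@' :: h3) :: t3 := by
            simp [splitNl, hs3]
          rw [hsr] at hs2
          obtain ⟨rfl, rfl⟩ := List.cons.inj hs2
          have ih1 := ih r3 (by simp at hl; omega) h3 t3 hs3
          simp only [List.drop_succ_cons, List.drop_zero]
          rw [ih1]
          simp [tT, fF, PySem.Chars.startswith]
        · rw [repl, if_neg (by rintro ⟨-, hx⟩; exact hp hx)]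
          rw [ih r hr h2 t2 hs2]
          have hf : fF h2 = h2 := by
            rw [fF, if_neg]
            rw [← startswith_split r h2 t2 hs2]
            simp only [PySem.Chars.startswith]
            intro hx
            exact hp (List.isPrefixOf_iff_prefix.mp hx)
          simp [tT, hf]
      · simp only [splitNl, if_neg hc] at hs
        rcases splitNl_shape r with ⟨h2, t2, hs2⟩
        rw [hs2] at hs
        obtain ⟨rfl, rfl⟩ := List.cons.inj hs
        rw [repl, if_neg (by rintro ⟨hx, -⟩; exact hc hx)]
        rw [ih r hr h2 t2 hs2]
        simp

lemma foldl_if_append {α β : Type} (p : α → Bool) (g1 g2 : α → β) (l : List α) (acc : List β) :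
    l.foldl (fun acc x => if p x then acc ++ [g1 x] else acc ++ [g2 x]) acc
      = l.foldl (fun acc x => acc ++ [if p x then g1 x else g2 x]) acc := by
  congr 1
  funext a x
  split <;> rfl

-- ===== VERDICT (by name: the statement is the Claim_ definition above) =====
theorem format_diff_with_line_numbers_spec : Claim_equal_format_diff_with_line_numbers := by
  intro diff _
  unfold Spec_format_diff_with_line_numbers format_diff_with_line_numbers format_diff_with_line_numbers_alt
  simp only []
  rw [foldl_if_append, PySem.List.foldl_append_singleton_eq_map]
  apply String.toList_inj.mp
  rcases splitNl_shape diff.toList with ⟨h, t, hs⟩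
  simp only [PySem.Str.join, String.toList_ofList]
  rw [show ("\n".toList : List Char) = ['\n'] from rfl] 
  rw [splitOn_eq, hs]
  rw [show (fun (x : Int × String) => if PySem.Str.startswith x.2 "@@" = true then "\n" ++ x.2 else x.2)
        = ((fun s => if PySem.Str.startswith s "@@" = true then "\n" ++ s else s) ∘ Prod.snd) from rfl]
  rw [← List.map_map, PySem.List.map_snd_enumerate]
  simp only [List.nil_append, List.map_map]
  have gline : (fun cs => String.toList
      ((fun s => if PySem.Str.startswith s "@@" = true then "\n" ++ s else s) (String.ofList cs))) = fF := by
    funext cs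
    simp only [PySem.Str.startswith, String.toList_ofList, fF]
    rw [show ("@@".toList : List Char) = ['@', '@'] from rfl]
    split <;> simp [String.toList_append, String.toList_ofList]
  rw [show (String.toList ∘ (fun s => if PySem.Str.startswith s "@@" = true then "\n" ++ s else s) ∘ String.ofList)
        = fF from gline]
  rw [join_map]
  have hrep : (PySem.Str.replace diff "\n@@" "\n\n@@").toList = h ++ tT t := by
    rw [PySem.Str.replace, String.toList_ofList]
    rw [show ("\n@@".toList : List Char) = ['\n', '@', '@'] from rfl,
        show ("\n\n@@".toList : List Char) = ['\n', '\n', '@', '@'] from rfl]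
    rw [replace_eq]
    exact main_lemma diff.toList.length diff.toList (le_refl _) h t hs
  have hsw : PySem.Str.startswith diff "@@" = PySem.Chars.startswith h ['@', '@'] := by
    rw [PySem.Str.startswith, show ("@@".toList : List Char) = ['@', '@'] from rfl]
    exact startswith_split diff.toList h t hs
  rw [hsw, fF]
  split
  · simp [String.toList_append, hrep]
  · exact hrep.symm
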